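-- pv_equiv track=rewrite | github.com/legiz-ru/mihomo-rule-sets | .github/workflows/wl_process.py | get_root
-- ===== SOURCE A (Python) =====
-- double_tlds = {'.gov.ru', '.com.ru', '.net.ru', '.org.ru', '.edu.ru'}
--
-- def get_root(domain):
--     domain = domain.lower().strip().rstrip('.')
--     for tld in double_tlds:
--         if domain.endswith(tld):
--             parts = domain[:-len(tld)].split('.')
--             return f'{parts[-1]}{tld}' if parts[-1] else domain
--     parts = domain.split('.')
--     return '.'.join(parts[-2:]) if len(parts) >= 2 else domain
-- ===== SOURCE B (Python) =====
-- double_tlds = {'.gov.ru', '.com.ru', '.net.ru', '.org.ru', '.edu.ru'}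
--
-- def get_root(domain):
--     domain = domain.lower().strip().rstrip('.')
--     parts = domain.split('.')
--     if len(parts) < 2:
--         return domain
--     tld = '.' + parts[-2] + '.' + parts[-1]
--     if tld in double_tlds:
--         if len(parts) >= 3 and parts[-3]:
--             return parts[-3] + tld
--         return domain
--     return parts[-2] + '.' + parts[-1]
-- ===== Notes on version B (the rewrite author's own statement) =====
-- stated objective: simpler
-- what changed: B replaces A's loop over the double-TLD set with endswith tests and suffix slicing/re-splitting by a single split into dot-labels followed by positional indexing from the right (parts[-1], parts[-2], parts[-3]).
import Mathlib
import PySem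

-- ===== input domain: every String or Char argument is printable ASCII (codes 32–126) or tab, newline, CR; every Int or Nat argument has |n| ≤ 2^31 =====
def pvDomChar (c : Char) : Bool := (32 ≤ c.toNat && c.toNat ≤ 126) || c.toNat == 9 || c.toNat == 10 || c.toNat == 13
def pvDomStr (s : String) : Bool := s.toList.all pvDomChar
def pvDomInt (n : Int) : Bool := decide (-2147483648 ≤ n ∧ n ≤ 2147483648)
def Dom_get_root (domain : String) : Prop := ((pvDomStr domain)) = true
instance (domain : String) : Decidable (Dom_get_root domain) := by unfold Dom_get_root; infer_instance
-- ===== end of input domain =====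

-- B extracts the root by splitting into dot-labels once and indexing from the right,
-- instead of A's loop over the double-TLD set with endswith/slice/re-split (objective: simpler).

-- ===== PORT A =====

-- exact port of Python's s.rstrip('.') (drop trailing '.' characters); shared by both ports
-- because both Python sources normalize with the identical first line
def rstripDots (s : List Char) : List Char :=
  (s.reverse.dropWhile (· == '.')).reverse

-- domain.lower().strip().rstrip('.')
def pyNormalize (s : List Char) : List Char :=
  rstripDots (PySem.Chars.rstrip (PySem.Chars.lstrip (PySem.Chars.lower s)))

-- the module constant double_tlds (a 5-element set of string literals; at most one can
-- match a given domain, so the set's iteration order cannot affect A's result)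
def doubleTlds : List (List Char) :=
  [['.','g','o','v','.','r','u'], ['.','c','o','m','.','r','u'], ['.','n','e','t','.','r','u'],
   ['.','o','r','g','.','r','u'], ['.','e','d','u','.','r','u']]

-- A's for-loop over double_tlds; the trailing [] case is the code after the loop
def getRootA_go (d : List Char) : List (List Char) → List Char
  | [] =>
      let parts := PySem.Chars.splitOn d ['.']
      if 2 ≤ parts.length then PySem.Chars.join ['.'] (PySem.List.slice parts (some (-2)) none) else d
  | t :: ts =>
      if PySem.Chars.endswith d t then
        let parts := PySem.Chars.splitOn (PySem.List.slice d none (some (-(t.length : Int)))) ['.']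
        match PySem.List.pyGet? parts (-1) with
        | some last => if last ≠ [] then last ++ t else d
        | none => d   -- unreachable: split never returns an empty list, so parts[-1] exists
      else getRootA_go d ts

def get_root (domain : String) : String :=
  String.ofList (getRootA_go (pyNormalize domain.toList) doubleTlds)

-- ===== PORT B =====

def getRootB_core (d : List Char) : List Char :=
  let parts := PySem.Chars.splitOn d ['.']
  if parts.length < 2 then d
  else
    let p1 := (PySem.List.pyGet? parts (-1)).getD []
    let p2 := (PySem.List.pyGet? parts (-2)).getD []
    let tld := '.' :: p2 ++ '.' :: p1
    if tld ∈ doubleTlds then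
      if 3 ≤ parts.length ∧ (PySem.List.pyGet? parts (-3)).getD [] ≠ [] then
        (PySem.List.pyGet? parts (-3)).getD [] ++ tld
      else d
    else p2 ++ '.' :: p1

def get_root_alt (domain : String) : String :=
  String.ofList (getRootB_core (pyNormalize domain.toList))

-- ===== PRECONDITION & SPEC =====
def Spec_get_root (domain : String) (out : String) : Prop := out = get_root_alt domain
instance (domain : String) (out : String) : Decidable (Spec_get_root domain out) := by unfold Spec_get_root; infer_instance

-- ===== CLAIM (what is proved, stated in full; the proofs are below) =====
def Claim_equal_get_root : Prop := ∀ (domain : String), Dom_get_root domain → Spec_get_root domain (get_root domain)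

-- ===== LEMMAS AND PROOFS =====

-- a simple structural model of splitting on '.'
def mySplit : List Char → List (List Char)
  | [] => [[]]
  | c :: rest => if c = '.' then [] :: mySplit rest else (mySplit rest).modifyHead (c :: ·)

def myJoin : List (List Char) → List Char
  | [] => []
  | [p] => p
  | p :: ps => p ++ '.' :: myJoin ps

theorem mySplit_ne_nil (l : List Char) : mySplit l ≠ [] := by
  cases l with
  | nil => simp [mySplit]
  | cons c rest =>
    simp only [mySplit]
    split
    · simp
    · have := mySplit_ne_nil rest
      cases h : mySplit rest with
      | nil => exact absurd h this
      | cons p ps => simp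

theorem splitOn_go_eq (l : List Char) : ∀ (fuel : Nat) (cur : List Char) (acc : List (List Char)),
    l.length ≤ fuel →
    PySem.Chars.splitOn.go ['.'] fuel l cur acc
      = acc.reverse ++ (mySplit l).modifyHead (cur.reverse ++ ·) := by
  induction l with
  | nil =>
    intro fuel cur acc _
    cases fuel <;> simp [PySem.Chars.splitOn.go, mySplit]
  | cons c rest ih =>
    intro fuel cur acc hf
    cases fuel with
    | zero => simp at hf
    | succ f =>
      simp only [PySem.Chars.splitOn.go]
      by_cases hc : c = '.'
      · subst hc
        rw [if_pos (by simp [List.isPrefixOf])]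
        simp only [List.length_cons, List.drop_succ_cons, List.length_nil, List.drop_zero]
        rw [ih f [] _ (by simpa using hf)]
        cases h : mySplit rest with
        | nil => exact absurd h (mySplit_ne_nil rest)
        | cons p ps => simp [mySplit, h]
      · rw [if_neg (by simp [List.isPrefixOf]; exact fun h => hc h.symm)]
        rw [ih f (c :: cur) acc (by simpa using hf)]
        cases h : mySplit rest with
        | nil => exact absurd h (mySplit_ne_nil rest)
        | cons p ps => simp [mySplit, h, hc]

theorem splitOn_eq_mySplit (l : List Char) : PySem.Chars.splitOn l ['.'] = mySplit l := by
  rw [PySem.Chars.splitOn, splitOn_go_eq l (l.length + 1) [] [] (by omega)]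
  cases h : mySplit l with
  | nil => exact absurd h (mySplit_ne_nil l)
  | cons p ps => simp

theorem mySplit_append_dot (xs ys : List Char) :
    mySplit (xs ++ '.' :: ys) = mySplit xs ++ mySplit ys := by
  induction xs with
  | nil => simp [mySplit]
  | cons c xs ih =>
    simp only [List.cons_append, mySplit, ih]
    split
    · simp
    · cases h : mySplit xs with
      | nil => exact absurd h (mySplit_ne_nil xs)
      | cons p ps => simp

theorem mySplit_dotless {w : List Char} (h : ('.' : Char) ∉ w) : mySplit w = [w] := by
  induction w with
  | nil => simp [mySplit]
  | cons c rest ih =>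
    simp only [mySplit]
    rw [if_neg (by intro hc; exact h (hc ▸ List.mem_cons_self))]
    rw [ih (fun hm => h (List.mem_cons_of_mem _ hm))]
    simp

theorem mem_mySplit_dotless {l : List Char} {p : List Char} (h : p ∈ mySplit l) :
    ('.' : Char) ∉ p := by
  induction l generalizing p with
  | nil => simp [mySplit] at h; simp [h]
  | cons c rest ih =>
    simp only [mySplit] at h
    by_cases hc : c = '.'
    · rw [if_pos hc] at h
      rcases List.mem_cons.mp h with h | h
      · simp [h]
      · exact ih h
    · rw [if_neg hc] at h
      cases hr : mySplit rest with
      | nil => exact absurd hr (mySplit_ne_nil rest)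
      | cons q qs =>
        rw [hr] at h
        simp only [List.modifyHead_cons] at h
        rcases List.mem_cons.mp h with h | h
        · subst h
          intro hm
          rcases List.mem_cons.mp hm with hm | hm
          · exact hc hm.symm
          · exact ih (hr ▸ List.mem_cons_self) hm
        · exact ih (hr ▸ List.mem_cons_of_mem _ h)

theorem myJoin_mySplit (l : List Char) : myJoin (mySplit l) = l := by
  induction l with
  | nil => simp [mySplit, myJoin]
  | cons c rest ih =>
    simp only [mySplit]
    by_cases hc : c = '.'
    · rw [if_pos hc]
      cases h : mySplit rest with
      | nil => exact absurd h (mySplit_ne_nil rest)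
      | cons p ps => rw [h] at ih; simp [myJoin, ih, hc]
    · rw [if_neg hc]
      cases h : mySplit rest with
      | nil => exact absurd h (mySplit_ne_nil rest)
      | cons p ps =>
        rw [h] at ih
        cases ps with
        | nil => simp [myJoin] at ih ⊢; simp [ih]
        | cons q qs => simp [myJoin] at ih ⊢; simp [ih]

theorem mySplit_myJoin {qs : List (List Char)} (hne : qs ≠ [])
    (hdot : ∀ p ∈ qs, ('.' : Char) ∉ p) : mySplit (myJoin qs) = qs := by
  induction qs with
  | nil => exact absurd rfl hne
  | cons p ps ih =>
    cases ps with
    | nil => simpa [myJoin] using mySplit_dotless (hdot p List.mem_cons_self)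
    | cons q qs' =>
      have : myJoin (p :: q :: qs') = p ++ '.' :: myJoin (q :: qs') := rfl
      rw [this, mySplit_append_dot, mySplit_dotless (hdot p List.mem_cons_self),
        ih (by simp) (fun r hr => hdot r (List.mem_cons_of_mem _ hr))]
      simp

theorem myJoin_append_two (qs : List (List Char)) (a b : List Char) (h : qs ≠ []) :
    myJoin (qs ++ [a, b]) = myJoin qs ++ '.' :: a ++ '.' :: b := by
  induction qs with
  | nil => exact absurd rfl h
  | cons p ps ih =>
    cases ps with
    | nil => simp [myJoin]
    | cons q qs' =>
      have h1 : myJoin ((p :: q :: qs') ++ [a, b]) = p ++ '.' :: myJoin ((q :: qs') ++ [a, b]) := rfl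
      have h2 : myJoin (p :: q :: qs') = p ++ '.' :: myJoin (q :: qs') := rfl
      rw [h1, h2, ih (by simp)]
      simp

theorem dotless_eq {a g b r : List Char} (ha : ('.' : Char) ∉ a) (hg : ('.' : Char) ∉ g)
    (h : a ++ '.' :: b = g ++ '.' :: r) : a = g ∧ b = r := by
  induction a generalizing g with
  | nil =>
    cases g with
    | nil => simpa using h
    | cons x g' =>
      simp only [List.nil_append, List.cons_append, List.cons.injEq] at h
      exact absurd (h.1 ▸ List.mem_cons_self) hg
  | cons c a' ih =>
    cases g with
    | nil =>
      simp only [List.cons_append, List.nil_append, List.cons.injEq] at h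
      exact absurd (h.1.symm ▸ List.mem_cons_self) ha
    | cons x g' =>
      simp only [List.cons_append, List.cons.injEq] at h
      obtain ⟨rfl, h2⟩ := h
      obtain ⟨h3, h4⟩ := ih (fun hm => ha (List.mem_cons_of_mem _ hm))
        (fun hm => hg (List.mem_cons_of_mem _ hm)) h2
      exact ⟨by rw [h3], h4⟩

theorem pyGet_last1 (qs : List (List Char)) (a b : List Char) :
    PySem.List.pyGet? (qs ++ [a, b]) (-1) = some b := by
  simp only [PySem.List.pyGet?, PySem.List.pyIdx?, List.length_append]
  norm_num

theorem pyGet_last2 (qs : List (List Char)) (a b : List Char) :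
    PySem.List.pyGet? (qs ++ [a, b]) (-2) = some a := by
  simp only [PySem.List.pyGet?, PySem.List.pyIdx?, List.length_append,
    List.length_cons, List.length_nil]
  rw [if_neg (by omega), if_pos (by push_cast; omega)]
  rw [Option.bind_some]
  rw [show qs.length + (0 + 1 + 1) - (-(-2 : Int)).toNat = qs.length by simp]
  rw [List.getElem?_append_right (by omega)]
  simp

theorem pyGet_last3 (qs : List (List Char)) (a b : List Char) (h : qs ≠ []) :
    PySem.List.pyGet? (qs ++ [a, b]) (-3) = qs.getLast? := by
  have hl : 1 ≤ qs.length := List.length_pos_iff.mpr h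
  simp only [PySem.List.pyGet?, PySem.List.pyIdx?, List.length_append,
    List.length_cons, List.length_nil]
  rw [if_neg (by omega), if_pos (by push_cast; omega)]
  rw [Option.bind_some]
  rw [show qs.length + (0 + 1 + 1) - (-(-3 : Int)).toNat = qs.length - 1 by simp]
  rw [List.getElem?_append_left (by omega)]
  rw [List.getLast?_eq_getElem?]

theorem pyGet_neg_one (xs : List (List Char)) : PySem.List.pyGet? xs (-1) = xs.getLast? := by
  cases xs with
  | nil => simp [PySem.List.pyGet?, PySem.List.pyIdx?]
  | cons x xs' =>
    simp only [PySem.List.pyGet?, PySem.List.pyIdx?, List.length_cons]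
    rw [if_neg (by omega), if_pos (by push_cast; omega)]
    rw [Option.bind_some]
    rw [show xs'.length + 1 - (-(-1 : Int)).toNat = xs'.length by simp]
    rw [List.getLast?_eq_getElem?]
    simp

theorem slice_last_two (qs : List (List Char)) (a b : List Char) :
    PySem.List.slice (qs ++ [a, b]) (some (-2)) none = [a, b] := by
  rw [PySem.List.slice_from_neg_ofNat _ 2 (by omega)]
  simp only [List.length_append, List.length_cons, List.length_nil]
  rw [show qs.length + (0 + 1 + 1) - 2 = qs.length by omega]
  simp

theorem join_two (a b : List Char) : PySem.Chars.join ['.'] [a, b] = a ++ '.' :: b := by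
  simp [PySem.Chars.join, List.intercalate]

theorem endswith_char {g r : List Char} (hg : ('.' : Char) ∉ g) (hr : ('.' : Char) ∉ r)
    (d : List Char) :
    PySem.Chars.endswith d ('.' :: (g ++ '.' :: r)) = true ↔
      ∃ qs, qs ≠ [] ∧ mySplit d = qs ++ [g, r] := by
  rw [PySem.Chars.endswith_iff]
  constructor
  · rintro ⟨m, rfl⟩
    refine ⟨mySplit m, mySplit_ne_nil m, ?_⟩
    rw [mySplit_append_dot m (g ++ '.' :: r), mySplit_append_dot g r,
      mySplit_dotless hg, mySplit_dotless hr]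
    rfl
  · rintro ⟨qs, hne, hsp⟩
    refine ⟨myJoin qs, ?_⟩
    have := myJoin_mySplit d
    rw [hsp, myJoin_append_two qs g r hne] at this
    rw [← this]
    simp

theorem main_match {d : List Char} {qs : List (List Char)} {a b g r : List Char}
    (hsplit : mySplit d = qs ++ [a, b]) (hg : ('.' : Char) ∉ g) (hr : ('.' : Char) ∉ r) :
    PySem.Chars.endswith d ('.' :: (g ++ '.' :: r)) = true ↔ (qs ≠ [] ∧ a = g ∧ b = r) := by
  rw [endswith_char hg hr]
  constructor
  · rintro ⟨qs', hne, hsp⟩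
    rw [hsplit] at hsp
    obtain ⟨h1, h2⟩ := List.append_inj' hsp.symm (by simp)
    simp only [List.cons.injEq] at h2
    exact ⟨h1 ▸ hne, h2.1.symm, h2.2.1.symm⟩
  · rintro ⟨hne, rfl, rfl⟩
    exact ⟨qs, hne, hsplit⟩

theorem slice_drop7 (u v : List Char) (hv : v.length = 7) :
    PySem.List.slice (u ++ v) none (some (-7)) = u := by
  rw [PySem.List.slice_to_neg_ofNat _ 7 (by omega)]
  simp [hv]

theorem A_cons_true (d t : List Char) (ts : List (List Char))
    (h : PySem.Chars.endswith d t = true) :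
    getRootA_go d (t :: ts) =
      (match PySem.List.pyGet?
          (PySem.Chars.splitOn (PySem.List.slice d none (some (-(t.length : Int)))) ['.']) (-1) with
        | some last => if last ≠ [] then last ++ t else d
        | none => d) := by
  simp [getRootA_go, h]

theorem A_cons_false (d t : List Char) (ts : List (List Char))
    (h : PySem.Chars.endswith d t = false) :
    getRootA_go d (t :: ts) = getRootA_go d ts := by
  simp [getRootA_go, h]

theorem A_nil (d : List Char) :
    getRootA_go d [] =
      if 2 ≤ (PySem.Chars.splitOn d ['.']).length then
        PySem.Chars.join ['.'] (PySem.List.slice (PySem.Chars.splitOn d ['.']) (some (-2)) none)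
      else d := by
  simp [getRootA_go]

-- B's value when the split has at least two labels
theorem B_eval (d : List Char) (qs : List (List Char)) (a b : List Char)
    (hsplit : mySplit d = qs ++ [a, b]) :
    getRootB_core d =
      if ('.' :: a ++ '.' :: b) ∈ doubleTlds then
        if qs ≠ [] ∧ (qs.getLast?.getD [] ≠ []) then qs.getLast?.getD [] ++ ('.' :: a ++ '.' :: b)
        else d
      else a ++ '.' :: b := by
  unfold getRootB_core
  rw [splitOn_eq_mySplit, hsplit]
  rw [if_neg (by simp)]
  rw [pyGet_last1, pyGet_last2]
  simp only [Option.getD_some]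
  rcases eq_or_ne qs [] with rfl | hqs
  · simp only [List.nil_append]
    by_cases hmem : ('.' :: a ++ '.' :: b) ∈ doubleTlds
    · rw [if_pos hmem, if_pos hmem, if_neg (by simp), if_neg (by simp)]
    · rw [if_neg hmem, if_neg hmem]
  · rw [pyGet_last3 _ _ _ hqs]
    have hlen : 3 ≤ (qs ++ [a, b]).length := by
      have := List.length_pos_iff.mpr hqs
      simp; omega
    by_cases hlast : qs.getLast?.getD [] ≠ []
    · by_cases hmem : ('.' :: a ++ '.' :: b) ∈ doubleTlds
      · rw [if_pos hmem, if_pos hmem, if_pos ⟨hlen, hlast⟩, if_pos ⟨hqs, hlast⟩]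
      · rw [if_neg hmem, if_neg hmem]
    · by_cases hmem : ('.' :: a ++ '.' :: b) ∈ doubleTlds
      · rw [if_pos hmem, if_pos hmem, if_neg (by tauto), if_neg (by tauto)]
      · rw [if_neg hmem, if_neg hmem]

-- the A loop when one double tld matches and there is a third-from-last label
theorem A_eval_hit (d : List Char) (qs : List (List Char)) (a b : List Char)
    (hsplit : mySplit d = qs ++ [a, b]) (hqs : qs ≠ [])
    (hmem : ('.' :: a ++ '.' :: b) ∈ doubleTlds) :
    getRootA_go d doubleTlds =
      if qs.getLast?.getD [] ≠ [] then qs.getLast?.getD [] ++ ('.' :: a ++ '.' :: b) else d := by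
  have ha : ('.' : Char) ∉ a := mem_mySplit_dotless (l := d) (by rw [hsplit]; simp)
  have hdot : ∀ p ∈ qs, ('.' : Char) ∉ p := fun p hp =>
    mem_mySplit_dotless (l := d) (by rw [hsplit]; exact List.mem_append_left _ hp)
  have hd : d = myJoin qs ++ '.' :: a ++ '.' :: b := by
    conv_lhs => rw [← myJoin_mySplit d, hsplit, myJoin_append_two _ _ _ hqs]
  have efalse : ∀ (g' r' : List Char), ('.' : Char) ∉ g' → ('.' : Char) ∉ r' →
      ¬(a = g' ∧ b = r') → PySem.Chars.endswith d ('.' :: (g' ++ '.' :: r')) = false := by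
    intro g' r' hg' hr' hne
    rw [Bool.eq_false_iff]
    intro htrue
    obtain ⟨_, h1, h2⟩ := (main_match hsplit hg' hr').mp htrue
    exact hne ⟨h1, h2⟩
  have branch : ∀ (t : List Char), t.length = 7 → t = '.' :: a ++ '.' :: b →
      (match PySem.List.pyGet?
          (PySem.Chars.splitOn (PySem.List.slice d none (some (-(t.length : Int)))) ['.']) (-1) with
        | some last => if last ≠ [] then last ++ t else d
        | none => d)
      = if qs.getLast?.getD [] ≠ [] then qs.getLast?.getD [] ++ ('.' :: a ++ '.' :: b) else d := by
    intro t ht7 hteq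
    have hsl : PySem.List.slice d none (some (-(t.length : Int))) = myJoin qs := by
      rw [ht7, show ((7 : Nat) : Int) = (7 : Int) by norm_num]
      rw [hd, show myJoin qs ++ '.' :: a ++ '.' :: b = myJoin qs ++ ('.' :: a ++ '.' :: b) by simp]
      exact slice_drop7 _ _ (by rw [← hteq]; exact ht7)
    rw [hsl, splitOn_eq_mySplit, mySplit_myJoin hqs hdot, pyGet_neg_one]
    rcases hql : qs.getLast? with _ | l
    · exact absurd (List.getLast?_eq_none_iff.mp hql) hqs
    · simp [hteq]
  have hdt : doubleTlds = [['.','g','o','v','.','r','u'], ['.','c','o','m','.','r','u'],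
      ['.','n','e','t','.','r','u'], ['.','o','r','g','.','r','u'], ['.','e','d','u','.','r','u']] := rfl
  simp only [doubleTlds, List.mem_cons, List.not_mem_nil, or_false] at hmem
  rcases hmem with hm | hm | hm | hm | hm
  · obtain ⟨rfl, rfl⟩ := dotless_eq (g := ['g','o','v']) (r := ['r','u']) ha (by decide)
      (show a ++ '.' :: b = ['g','o','v','.','r','u'] by simpa using hm)
    have et : PySem.Chars.endswith d ['.','g','o','v','.','r','u'] = true :=
      (main_match (g := ['g','o','v']) (r := ['r','u']) hsplit (by decide) (by decide)).mpr ⟨hqs, rfl, rfl⟩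
    rw [hdt,
      A_cons_true _ _ _ et]
    exact branch _ (by decide) (by decide)
  · obtain ⟨rfl, rfl⟩ := dotless_eq (g := ['c','o','m']) (r := ['r','u']) ha (by decide)
      (show a ++ '.' :: b = ['c','o','m','.','r','u'] by simpa using hm)
    have et : PySem.Chars.endswith d ['.','c','o','m','.','r','u'] = true :=
      (main_match (g := ['c','o','m']) (r := ['r','u']) hsplit (by decide) (by decide)).mpr ⟨hqs, rfl, rfl⟩
    have f0 : PySem.Chars.endswith d ['.','g','o','v','.','r','u'] = false :=
      efalse ['g','o','v'] ['r','u'] (by decide) (by decide) (by decide)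
    rw [hdt,
      A_cons_false _ _ _ f0,
      A_cons_true _ _ _ et]
    exact branch _ (by decide) (by decide)
  · obtain ⟨rfl, rfl⟩ := dotless_eq (g := ['n','e','t']) (r := ['r','u']) ha (by decide)
      (show a ++ '.' :: b = ['n','e','t','.','r','u'] by simpa using hm)
    have et : PySem.Chars.endswith d ['.','n','e','t','.','r','u'] = true :=
      (main_match (g := ['n','e','t']) (r := ['r','u']) hsplit (by decide) (by decide)).mpr ⟨hqs, rfl, rfl⟩
    have f0 : PySem.Chars.endswith d ['.','g','o','v','.','r','u'] = false :=
      efalse ['g','o','v'] ['r','u'] (by decide) (by decide) (by decide)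
    have f1 : PySem.Chars.endswith d ['.','c','o','m','.','r','u'] = false :=
      efalse ['c','o','m'] ['r','u'] (by decide) (by decide) (by decide)
    rw [hdt,
      A_cons_false _ _ _ f0,
      A_cons_false _ _ _ f1,
      A_cons_true _ _ _ et]
    exact branch _ (by decide) (by decide)
  · obtain ⟨rfl, rfl⟩ := dotless_eq (g := ['o','r','g']) (r := ['r','u']) ha (by decide)
      (show a ++ '.' :: b = ['o','r','g','.','r','u'] by simpa using hm)
    have et : PySem.Chars.endswith d ['.','o','r','g','.','r','u'] = true :=
      (main_match (g := ['o','r','g']) (r := ['r','u']) hsplit (by decide) (by decide)).mpr ⟨hqs, rfl, rfl⟩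
    have f0 : PySem.Chars.endswith d ['.','g','o','v','.','r','u'] = false :=
      efalse ['g','o','v'] ['r','u'] (by decide) (by decide) (by decide)
    have f1 : PySem.Chars.endswith d ['.','c','o','m','.','r','u'] = false :=
      efalse ['c','o','m'] ['r','u'] (by decide) (by decide) (by decide)
    have f2 : PySem.Chars.endswith d ['.','n','e','t','.','r','u'] = false :=
      efalse ['n','e','t'] ['r','u'] (by decide) (by decide) (by decide)
    rw [hdt,
      A_cons_false _ _ _ f0,
      A_cons_false _ _ _ f1,
      A_cons_false _ _ _ f2,
      A_cons_true _ _ _ et]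
    exact branch _ (by decide) (by decide)
  · obtain ⟨rfl, rfl⟩ := dotless_eq (g := ['e','d','u']) (r := ['r','u']) ha (by decide)
      (show a ++ '.' :: b = ['e','d','u','.','r','u'] by simpa using hm)
    have et : PySem.Chars.endswith d ['.','e','d','u','.','r','u'] = true :=
      (main_match (g := ['e','d','u']) (r := ['r','u']) hsplit (by decide) (by decide)).mpr ⟨hqs, rfl, rfl⟩
    have f0 : PySem.Chars.endswith d ['.','g','o','v','.','r','u'] = false :=
      efalse ['g','o','v'] ['r','u'] (by decide) (by decide) (by decide)
    have f1 : PySem.Chars.endswith d ['.','c','o','m','.','r','u'] = false :=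
      efalse ['c','o','m'] ['r','u'] (by decide) (by decide) (by decide)
    have f2 : PySem.Chars.endswith d ['.','n','e','t','.','r','u'] = false :=
      efalse ['n','e','t'] ['r','u'] (by decide) (by decide) (by decide)
    have f3 : PySem.Chars.endswith d ['.','o','r','g','.','r','u'] = false :=
      efalse ['o','r','g'] ['r','u'] (by decide) (by decide) (by decide)
    rw [hdt,
      A_cons_false _ _ _ f0,
      A_cons_false _ _ _ f1,
      A_cons_false _ _ _ f2,
      A_cons_false _ _ _ f3,
      A_cons_true _ _ _ et]
    exact branch _ (by decide) (by decide)

theorem A_eval_nohit (d : List Char) (qs : List (List Char)) (a b : List Char)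
    (hsplit : mySplit d = qs ++ [a, b])
    (hno : ∀ (g' r' : List Char), ('.' : Char) ∉ g' → ('.' : Char) ∉ r' →
      ('.' :: g' ++ '.' :: r') ∈ doubleTlds → ¬(qs ≠ [] ∧ a = g' ∧ b = r')) :
    getRootA_go d doubleTlds = a ++ '.' :: b := by
  have hdt : doubleTlds = [['.','g','o','v','.','r','u'], ['.','c','o','m','.','r','u'],
      ['.','n','e','t','.','r','u'], ['.','o','r','g','.','r','u'], ['.','e','d','u','.','r','u']] := rfl
  have f1 : PySem.Chars.endswith d ['.','g','o','v','.','r','u'] = false := by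
    rw [Bool.eq_false_iff]; intro ht
    exact hno ['g','o','v'] ['r','u'] (by decide) (by decide) (by decide)
      ((main_match (g := ['g','o','v']) (r := ['r','u']) hsplit (by decide) (by decide)).mp ht)
  have f2 : PySem.Chars.endswith d ['.','c','o','m','.','r','u'] = false := by
    rw [Bool.eq_false_iff]; intro ht
    exact hno ['c','o','m'] ['r','u'] (by decide) (by decide) (by decide)
      ((main_match (g := ['c','o','m']) (r := ['r','u']) hsplit (by decide) (by decide)).mp ht)
  have f3 : PySem.Chars.endswith d ['.','n','e','t','.','r','u'] = false := by
    rw [Bool.eq_false_iff]; intro ht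
    exact hno ['n','e','t'] ['r','u'] (by decide) (by decide) (by decide)
      ((main_match (g := ['n','e','t']) (r := ['r','u']) hsplit (by decide) (by decide)).mp ht)
  have f4 : PySem.Chars.endswith d ['.','o','r','g','.','r','u'] = false := by
    rw [Bool.eq_false_iff]; intro ht
    exact hno ['o','r','g'] ['r','u'] (by decide) (by decide) (by decide)
      ((main_match (g := ['o','r','g']) (r := ['r','u']) hsplit (by decide) (by decide)).mp ht)
  have f5 : PySem.Chars.endswith d ['.','e','d','u','.','r','u'] = false := by
    rw [Bool.eq_false_iff]; intro ht
    exact hno ['e','d','u'] ['r','u'] (by decide) (by decide) (by decide)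
      ((main_match (g := ['e','d','u']) (r := ['r','u']) hsplit (by decide) (by decide)).mp ht)
  rw [hdt, A_cons_false _ _ _ f1, A_cons_false _ _ _ f2, A_cons_false _ _ _ f3,
    A_cons_false _ _ _ f4, A_cons_false _ _ _ f5, A_nil, splitOn_eq_mySplit, hsplit]
  rw [if_pos (by simp)]
  rw [slice_last_two, join_two]

theorem coreAB (d : List Char) : getRootA_go d doubleTlds = getRootB_core d := by
  rcases h : (mySplit d).reverse with _ | ⟨b, bs⟩
  · exact absurd (List.reverse_eq_nil_iff.mp h) (mySplit_ne_nil d)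
  rcases bs with _ | ⟨a, qsr⟩
  · -- single label: no dot in d
    have hP : mySplit d = [b] := by
      rw [← List.reverse_reverse (mySplit d), h]; rfl
    have fall : ∀ (g' r' : List Char), ('.' : Char) ∉ g' → ('.' : Char) ∉ r' →
        PySem.Chars.endswith d ('.' :: (g' ++ '.' :: r')) = false := by
      intro g' r' hg' hr'
      rw [Bool.eq_false_iff]; intro ht
      obtain ⟨qs, hne, hq⟩ := (endswith_char hg' hr' d).mp ht
      rw [hP] at hq
      have := congrArg List.length hq
      simp at this
    have hdt : doubleTlds = [['.','g','o','v','.','r','u'], ['.','c','o','m','.','r','u'],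
        ['.','n','e','t','.','r','u'], ['.','o','r','g','.','r','u'], ['.','e','d','u','.','r','u']] := rfl
    have f1 : PySem.Chars.endswith d ['.','g','o','v','.','r','u'] = false :=
      fall ['g','o','v'] ['r','u'] (by decide) (by decide)
    have f2 : PySem.Chars.endswith d ['.','c','o','m','.','r','u'] = false :=
      fall ['c','o','m'] ['r','u'] (by decide) (by decide)
    have f3 : PySem.Chars.endswith d ['.','n','e','t','.','r','u'] = false :=
      fall ['n','e','t'] ['r','u'] (by decide) (by decide)
    have f4 : PySem.Chars.endswith d ['.','o','r','g','.','r','u'] = false :=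
      fall ['o','r','g'] ['r','u'] (by decide) (by decide)
    have f5 : PySem.Chars.endswith d ['.','e','d','u','.','r','u'] = false :=
      fall ['e','d','u'] ['r','u'] (by decide) (by decide)
    rw [hdt, A_cons_false _ _ _ f1, A_cons_false _ _ _ f2, A_cons_false _ _ _ f3,
      A_cons_false _ _ _ f4, A_cons_false _ _ _ f5, A_nil, splitOn_eq_mySplit, hP]
    rw [if_neg (by simp)]
    unfold getRootB_core
    rw [splitOn_eq_mySplit, hP, if_pos (by simp)]
  · -- at least two labels
    have hsplit : mySplit d = qsr.reverse ++ [a, b] := by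
      rw [← List.reverse_reverse (mySplit d), h]; simp
    rw [B_eval d _ a b hsplit]
    by_cases hmem : ('.' :: a ++ '.' :: b) ∈ doubleTlds
    · rcases eq_or_ne qsr.reverse [] with hqs | hqs
      · rw [A_eval_nohit d _ a b hsplit (fun g' r' _ _ _ hc => hc.1 hqs)]
        rw [if_pos hmem, if_neg (fun hc => hc.1 hqs)]
        have hde : d = a ++ '.' :: b := by
          conv_lhs => rw [← myJoin_mySplit d, hsplit, hqs]
          rfl
        exact hde.symm
      · rw [A_eval_hit d _ a b hsplit hqs hmem, if_pos hmem]
        by_cases hlast : (qsr.reverse).getLast?.getD [] ≠ []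
        · rw [if_pos hlast, if_pos ⟨hqs, hlast⟩]
        · rw [if_neg hlast, if_neg (fun hc => hlast hc.2)]
    · rw [A_eval_nohit d _ a b hsplit
        (fun g' r' hg' hr' hmem' hc => by obtain ⟨_, rfl, rfl⟩ := hc; exact hmem hmem'),
        if_neg hmem]

-- ===== VERDICT (by name: the statement is the Claim_ definition above) =====
theorem get_root_spec : Claim_equal_get_root := by
  intro domain _
  unfold Spec_get_root get_root get_root_alt
  rw [coreAB]
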